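-- pv_equiv track=rewrite | github.com/keerthirajsivashankar/My_Python_Solutions | Easy/2ndmost.py | ndmost
-- ===== SOURCE A (Python) =====
-- from collections import Counter
--
-- def ndmost(s):
--     count = Counter(s)
--
--     # Get unique frequencies in descending order
--     freqs = sorted(set(count.values()), reverse=True)
--
--     if len(freqs) < 2:
--         return None  # No second most frequent character
--
--     second_most_freq = freqs[1]  # Get the second highest frequency
--
--     for char, freq in count.items():
--         if freq == second_most_freq:
--             return char  # Return the first character with second highest frequency
-- ===== SOURCE B (Python) =====
-- from collections import Counter
--
-- def ndmost(s):
--     count = Counter(s)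
--     first = None
--     second = None
--     for f in count.values():
--         if first is None or f > first:
--             second = first
--             first = f
--         elif f < first and (second is None or f > second):
--             second = f
--     if second is None:
--         return None
--     return next((ch for ch, f in count.items() if f == second), None)
-- ===== Notes on version B (the rewrite author's own statement) =====
-- stated objective: simpler
-- what changed: Instead of building the set of distinct frequencies and sorting it in descending order to read off the second element, B makes one linear pass over the counter's values tracking the two largest distinct frequencies, then scans items for the first char with the second-largest one.
import Mathlib
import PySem

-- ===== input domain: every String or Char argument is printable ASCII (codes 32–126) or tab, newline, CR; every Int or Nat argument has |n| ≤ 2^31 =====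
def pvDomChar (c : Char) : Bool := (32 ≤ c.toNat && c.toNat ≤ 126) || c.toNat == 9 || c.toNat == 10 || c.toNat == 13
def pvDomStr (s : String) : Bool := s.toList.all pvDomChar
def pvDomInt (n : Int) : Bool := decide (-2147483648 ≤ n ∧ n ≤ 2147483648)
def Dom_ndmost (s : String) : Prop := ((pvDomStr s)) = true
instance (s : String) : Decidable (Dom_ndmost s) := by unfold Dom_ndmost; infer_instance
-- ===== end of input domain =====

-- B replaces A's sort of the distinct frequency set by a single linear pass that
-- tracks the two largest distinct frequencies (objective: simpler/alternative).

-- ===== PORT A =====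
-- A's final for-loop over count.items(): first char whose count equals the target
def pvFindFreqA : List (Char × Int) → Int → Option String
  | [], _ => none
  | (c, f) :: rest, target =>
      if f == target then some (String.mk [c]) else pvFindFreqA rest target

def ndmost (s : String) : Option String :=
  let count := PySem.Dict.counter s.toList
  let freqs := PySem.List.sorted (PySem.Set.ofList count.values) (fun x => x) true
  match freqs with
  | _ :: f1 :: _ => pvFindFreqA count.items f1   -- len(freqs) ≥ 2: second = freqs[1]
  | _ => none                                    -- len(freqs) < 2

-- ===== PORT B =====
-- one step of B's loop over count.values(): (first, second) largest DISTINCT so far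
def pvTop2Step (st : Option Int × Option Int) (f : Int) : Option Int × Option Int :=
  match st.1 with
  | none => (some f, none)
  | some fi =>
    if fi < f then (some f, some fi)
    else if f < fi then
      match st.2 with
      | none => (some fi, some f)
      | some se => if se < f then (some fi, some f) else (some fi, some se)
    else (some fi, st.2)

def ndmost_alt (s : String) : Option String :=
  let count := PySem.Dict.counter s.toList
  let st := count.values.foldl pvTop2Step (none, none)
  match st.2 with
  | none => none
  | some target =>
      (count.items.find? (fun p => p.2 == target)).map (fun p => String.mk [p.1])

-- ===== PRECONDITION & SPEC =====
def Spec_ndmost (s : String) (out : Option String) : Prop := out = ndmost_alt s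
instance (s : String) (out : Option String) : Decidable (Spec_ndmost s out) := by unfold Spec_ndmost; infer_instance

-- ===== CLAIM (what is proved, stated in full; the proofs are below) =====
def Claim_equal_ndmost : Prop := ∀ (s : String), Dom_ndmost s → Spec_ndmost s (ndmost s)

-- ===== LEMMAS AND PROOFS =====

-- max of the elements strictly below the maximum (spec of B's `second`)
def pvMB (l : List Int) : Option Int :=
  match l.max? with
  | none => none
  | some m => (l.filter (fun x => decide (x < m))).max?

theorem pvMax?_append_singleton (xs : List Int) (y : Int) :
    (xs ++ [y]).max? = some (match xs.max? with | none => y | some m => max m y) := by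
  cases xs with
  | nil => rfl
  | cons a t => simp [List.max?, List.foldl_append]

theorem pvFold_top2 (l : List Int) :
    l.foldl pvTop2Step (none, none) = (l.max?, pvMB l) := by
  induction l using List.reverseRecOn with
  | nil => rfl
  | append_singleton l f ih =>
    rw [List.foldl_append, ih]
    rcases hM : l.max? with _ | m
    · have : l = [] := List.max?_eq_none_iff.mp hM
      subst this
      simp [pvTop2Step, pvMB, List.max?, List.filter]
    · obtain ⟨hmMem, hub⟩ := List.max?_eq_some_iff.mp hM
      have hMapp : (l ++ [f]).max? = some (max m f) := by
        rw [pvMax?_append_singleton, hM]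
      simp only [pvMB, hM]
      rcases lt_trichotomy m f with hlt | heq | hgt
      · -- f is a new strict maximum; second becomes m
        have hmax : max m f = f := max_eq_right hlt.le
        have hfil : (l ++ [f]).filter (fun x => decide (x < f)) = l := by
          rw [List.filter_append]
          have h1 : l.filter (fun x => decide (x < f)) = l :=
            List.filter_eq_self.mpr (fun x hx => by
              simpa using lt_of_le_of_lt (hub x hx) hlt)
          simp [h1]
        simp [pvTop2Step, hMapp, hmax, hlt, hfil, hM]
      · -- f equals the current maximum: state unchanged
        subst heq
        have hfil : (l ++ [m]).filter (fun x => decide (x < m)) =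
            l.filter (fun x => decide (x < m)) := by
          simp [List.filter_append]
        simp [pvTop2Step, hMapp, hfil]
      · -- f below the maximum: maximum unchanged, f competes for second
        have hmax : max m f = m := max_eq_left hgt.le
        have hfil : (l ++ [f]).filter (fun x => decide (x < m)) =
            l.filter (fun x => decide (x < m)) ++ [f] := by
          simp [List.filter_append, hgt]
        have h2 := pvMax?_append_singleton (l.filter (fun x => decide (x < m))) f
        rcases hB : (l.filter (fun x => decide (x < m))).max? with _ | se
        · rw [hB] at h2
          simp only [] at h2
          simp [pvTop2Step, hMapp, hmax, hfil, h2, hgt, not_lt.mpr hgt.le]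
        · rw [hB] at h2
          simp only [] at h2
          by_cases hse : se < f
          · simp [pvTop2Step, hMapp, hmax, hfil, h2, hgt, not_lt.mpr hgt.le,
              hse, max_eq_right hse.le]
          · simp [pvTop2Step, hMapp, hmax, hfil, h2, hgt, not_lt.mpr hgt.le,
              hse, max_eq_left (not_lt.mp hse)]

theorem pvFindFreqA_eq (l : List (Char × Int)) (t : Int) :
    pvFindFreqA l t = (l.find? (fun p => p.2 == t)).map (fun p => String.mk [p.1]) := by
  induction l with
  | nil => rfl
  | cons p rest ih =>
    obtain ⟨c, f⟩ := p
    simp only [pvFindFreqA, List.find?_cons]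
    cases h : (f == t) <;> simp [ih]

-- ===== VERDICT (by name: the statement is the Claim_ definition above) =====
theorem ndmost_spec : Claim_equal_ndmost := by
  intro s _
  unfold Spec_ndmost ndmost ndmost_alt
  simp only []
  set count := PySem.Dict.counter s.toList with hcount
  set vs := count.values with hvs
  set S := PySem.Set.ofList vs with hS
  have hmemS : ∀ x : Int, x ∈ S ↔ x ∈ vs := fun x => PySem.Set.mem_ofList vs x
  have hperm : (PySem.List.sorted S (fun x => x) true).Perm S :=
    PySem.List.sorted_perm S (fun x => x) true
  have hpw : (PySem.List.sorted S (fun x => x) true).Pairwise (fun a b => b ≤ a) :=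
    PySem.List.sorted_pairwise_rev S (fun x => x)
  have hnd : (PySem.List.sorted S (fun x => x) true).Nodup :=
    hperm.nodup_iff.mpr (PySem.Set.nodup_ofList vs)
  rw [pvFold_top2]
  rcases hfr : PySem.List.sorted S (fun x => x) true with _ | ⟨a, _ | ⟨b, t⟩⟩
  · -- no characters at all
    have hvsnil : vs = [] := by
      cases hv : vs with
      | nil => rfl
      | cons x xs =>
        exfalso
        have : x ∈ S := (hmemS x).mpr (by simp [hv])
        have := hperm.mem_iff.mpr this
        simp [hfr] at this
    simp [hvsnil, pvMB, List.max?]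
  · -- exactly one distinct frequency
    have hall : ∀ y ∈ vs, y = a := by
      intro y hy
      have : y ∈ PySem.List.sorted S (fun x => x) true :=
        hperm.mem_iff.mpr ((hmemS y).mpr hy)
      simpa [hfr] using this
    have hMB : pvMB vs = none := by
      unfold pvMB
      rcases hM : vs.max? with _ | m
      · rfl
      · have hfil : vs.filter (fun x => decide (x < m)) = [] := by
          apply List.filter_eq_nil_iff.mpr
          intro x hx
          have hm := (List.max?_eq_some_iff.mp hM).1
          have := hall x hx
          have := hall m hm
          simp_all
        simp [hfil, List.max?]
    simp [hMB]
  · -- at least two distinct frequencies: second = b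
    rw [hfr] at hperm hpw hnd
    have hmem : ∀ y, y ∈ vs ↔ y ∈ a :: b :: t := by
      intro y
      rw [← hmemS, ← hperm.mem_iff]
    have havs : a ∈ vs := (hmem a).mpr (by simp)
    have hbvs : b ∈ vs := (hmem b).mpr (by simp)
    have hba : b ≤ a := (List.pairwise_cons.mp hpw).1 b (by simp)
    have hne : a ≠ b := by
      intro h; subst h; simp [List.nodup_cons] at hnd
    have hubA : ∀ y ∈ vs, y ≤ a := by
      intro y hy
      rcases List.mem_cons.mp ((hmem y).mp hy) with h | h
      · exact le_of_eq h
      · exact (List.pairwise_cons.mp hpw).1 y h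
    have hMB : pvMB vs = some b := by
      unfold pvMB
      rw [List.max?_eq_some_iff.mpr ⟨havs, hubA⟩]
      apply List.max?_eq_some_iff.mpr
      constructor
      · exact List.mem_filter.mpr ⟨hbvs, by simp; omega⟩
      · intro y hy
        obtain ⟨hyvs, hyb⟩ := List.mem_filter.mp hy
        have hya : y < a := by simpa using hyb
        rcases List.mem_cons.mp ((hmem y).mp hyvs) with h | h
        · omega
        rcases List.mem_cons.mp h with h2 | h2
        · omega
        · have := (List.pairwise_cons.mp (List.pairwise_cons.mp hpw).2).1 y h2
          omega
    rw [hMB]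
    exact pvFindFreqA_eq count.items b
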